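-- pv_equiv track=rewrite | github.com/isabella232/LongestUncommonSubsequence | LUSPart2.py | LUS
-- ===== SOURCE A (Python) =====
-- def IsSubsequence(str1, str2, m, n): #returns true is string1 is a subsequence of string2
--
--     if m == 0:    return True
--     if n == 0:    return False
--
--     # If last characters of two strings are matching
--     if str1[m-1] == str2[n-1]:
--         return IsSubsequence(str1, str2, m-1, n-1)
--
--     # If last characters are not matching
--     return IsSubsequence(str1, str2, m, n-1)
--
-- def LUS(arr):
--
--   	# Converting array to set. A set removes all duplicate elements so if after converting, the length is 1
--   	# it means that all the strings were equal to each other.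
-- 	if len(set(arr)) == 1:
-- 		return -1
--
-- 	arr.sort(key=len, reverse=True) # sorting strings by length (descending order)
--
-- 	for str1 in arr:
-- 		subflag = False
-- 		equal = 0
--
-- 		for str2 in arr: # checking if the string is a subsequence of any other string
-- 			if str1 == str2:
-- 				equal = equal + 1
-- 			else:
-- 				if IsSubsequence(str1,str2,len(str1),len(str2)):
-- 					subflag = True
--
-- 		# if the string is a subsequence of another string
-- 		# move on to the next longest string in the array
-- 		if subflag == True or equal == 2:
-- 			continue
-- 		else:
-- 			return len(str1)
-- 	return -1
-- ===== SOURCE B (Python) =====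
-- # B: same LUS driver decisions, but the per-string inner loop is replaced by a
-- # count + any() over an iterative two-pointer subsequence scan (A's recursive
-- # back-to-front helper disappears). Unlike A, B does not sort `arr` in place:
-- # equivalence is about the return value only.
-- def IsSubseq(s, t):
--     i = 0
--     for c in t:
--         if i < len(s) and s[i] == c:
--             i += 1
--     return i == len(s)
--
-- def LUS(arr):
--     if len(set(arr)) == 1:
--         return -1
--     ss = sorted(arr, key=len, reverse=True)
--     for s1 in ss:
--         if ss.count(s1) != 2 and not any(s2 != s1 and IsSubseq(s1, s2) for s2 in ss):
--             return len(s1)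
--     return -1
-- ===== Notes on version B (the rewrite author's own statement) =====
-- stated objective: idiomatic
-- what changed: The recursive back-to-front IsSubsequence helper is replaced by an iterative front-to-back two-pointer scan, and A's inner loop with its (subflag, equal) accumulator pair is decomposed into a list count plus an any() over that scan; B also does not sort the input list in place.
import Mathlib
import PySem

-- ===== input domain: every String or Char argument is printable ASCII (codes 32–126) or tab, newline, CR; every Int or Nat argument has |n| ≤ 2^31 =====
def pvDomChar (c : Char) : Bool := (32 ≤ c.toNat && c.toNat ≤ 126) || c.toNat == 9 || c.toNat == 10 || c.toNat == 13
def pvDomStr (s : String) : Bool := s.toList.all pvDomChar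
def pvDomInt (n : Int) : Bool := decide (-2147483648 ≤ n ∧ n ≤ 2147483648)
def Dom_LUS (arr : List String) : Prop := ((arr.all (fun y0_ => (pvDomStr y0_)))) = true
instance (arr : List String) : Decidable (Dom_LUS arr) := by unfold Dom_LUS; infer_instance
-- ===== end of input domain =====

-- ===== PORT A =====
-- B does not sort the caller's list in place (A does); the claim is about the return value only.
-- IsSubsequence(str1, str2, m, n): A's back-to-front recursion; m, n are the live suffix lengths.
def IsSubsequence (s1 s2 : List Char) (m n : Nat) : Bool :=
  match m, n with
  | 0, _ => true
  | _ + 1, 0 => false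
  | m' + 1, n' + 1 =>
    -- str1[m-1] == str2[n-1]; the indices m-1, n-1 are m', n'
    if PySem.List.pyGet? s1 (m' : Int) = PySem.List.pyGet? s2 (n' : Int) then
      IsSubsequence s1 s2 m' n'
    else
      IsSubsequence s1 s2 (m' + 1) n'
termination_by n

-- the 'for str1 in arr' loop (all = the sorted arr both loops range over)
def lusLoopA (all : List String) : List String → Int
  | [] => -1
  | s1 :: rest =>
    let st := all.foldl (fun (p : Bool × Int) s2 =>
      if s1 = s2 then (p.1, p.2 + 1)
      else if IsSubsequence s1.toList s2.toList s1.toList.length s2.toList.length then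
        (true, p.2)
      else p) (false, 0)
    if st.1 || st.2 == 2 then lusLoopA all rest else PySem.Str.len s1

def LUS (arr : List String) : Int :=
  if PySem.Set.len (PySem.Set.ofList arr) = 1 then -1
  else
    let ss := PySem.List.sorted arr (fun s => PySem.Str.len s) true
    lusLoopA ss ss

-- ===== PORT B =====
-- iterative two-pointer scan: walk i through s while iterating over t
def IsSubseq (s t : List Char) : Bool :=
  (t.foldl (fun (i : Nat) c =>
      -- 'i < len(s) and s[i] == c'; the guard keeps the index in range, so getD is exact
      if i < s.length && s.getD i ' ' == c then i + 1 else i) 0) == s.length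

def lusLoopB (ss : List String) : List String → Int
  | [] => -1
  | s1 :: rest =>
    if PySem.List.count ss s1 != 2
        && !(ss.any (fun s2 => s2 != s1 && IsSubseq s1.toList s2.toList)) then
      PySem.Str.len s1
    else lusLoopB ss rest

def LUS_alt (arr : List String) : Int :=
  if PySem.Set.len (PySem.Set.ofList arr) = 1 then -1
  else
    let ss := PySem.List.sorted arr (fun s => PySem.Str.len s) true
    lusLoopB ss ss

-- ===== PRECONDITION & SPEC =====
def Spec_LUS (arr : List String) (out : Int) : Prop := out = LUS_alt arr
instance (arr : List String) (out : Int) : Decidable (Spec_LUS arr out) := by unfold Spec_LUS; infer_instance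

-- ===== CLAIM (what is proved, stated in full; the proofs are below) =====
def Claim_equal_LUS : Prop := ∀ (arr : List String), Dom_LUS arr → Spec_LUS arr (LUS arr)

-- ===== LEMMAS AND PROOFS =====

theorem snoc_sublist_snoc (a : Char) (l1 l2 : List Char) :
    (l1 ++ [a]).Sublist (l2 ++ [a]) ↔ l1.Sublist l2 := by
  rw [← List.reverse_sublist]; simp [List.cons_sublist_cons, List.reverse_sublist]

theorem snoc_sublist_snoc_ne (a b : Char) (l1 l2 : List Char) (h : a ≠ b) :
    (l1 ++ [a]).Sublist (l2 ++ [b]) ↔ (l1 ++ [a]).Sublist l2 := by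
  rw [← List.reverse_sublist, ← List.reverse_sublist (l₂ := l2)]
  simp only [List.reverse_append, List.reverse_singleton, List.singleton_append]
  rw [List.sublist_cons_iff]
  constructor
  · rintro (h1 | ⟨r, hr, _⟩)
    · exact h1
    · cases hr; exact absurd rfl h
  · exact Or.inl

theorem isSubsequence_iff (s1 s2 : List Char) :
    ∀ n m, m ≤ s1.length → n ≤ s2.length →
      (IsSubsequence s1 s2 m n = true ↔ (s1.take m).Sublist (s2.take n)) := by
  intro n
  induction n with
  | zero =>
    intro m hm _
    cases m with
    | zero => simp [IsSubsequence]
    | succ m' =>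
      simp only [IsSubsequence, List.take_zero, List.sublist_nil, List.take_eq_nil_iff]
      constructor
      · intro h; cases h
      · rintro (h | h) <;> [omega; (subst h; simp at hm)]
  | succ n' ih =>
    intro m hm hn
    cases m with
    | zero => simp [IsSubsequence, List.nil_sublist]
    | succ m' =>
      have hm' : m' < s1.length := by omega
      have hn' : n' < s2.length := by omega
      rw [List.take_add_one, List.take_add_one,
        List.getElem?_eq_getElem hm', List.getElem?_eq_getElem hn']
      simp only [IsSubsequence, PySem.List.pyGet?_natCast,
        List.getElem?_eq_getElem hm', List.getElem?_eq_getElem hn', Option.some_inj,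
        Option.toList_some]
      by_cases hc : s1[m'] = s2[n']
      · rw [if_pos hc, hc, snoc_sublist_snoc]
        exact ih m' (by omega) (by omega)
      · rw [if_neg hc, snoc_sublist_snoc_ne _ _ _ _ hc,
          ih (m' + 1) hm (by omega), List.take_add_one,
          List.getElem?_eq_getElem hm', Option.toList_some]

theorem foldTP (s : List Char) :
    ∀ (t : List Char) (i : Nat), i ≤ s.length →
      ((t.foldl (fun (i : Nat) c =>
          if i < s.length && s.getD i ' ' == c then i + 1 else i) i) == s.length)
        = (s.drop i).isSublist t := by
  intro t
  induction t with
  | nil =>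
    intro i hi
    rcases eq_or_lt_of_le hi with h | h
    · simp [h, List.drop_length, List.isSublist]
    · have hd := List.drop_eq_getElem_cons h
      rw [List.foldl_nil, hd]
      simp [List.isSublist, Nat.ne_of_lt h]
  | cons d t' ih =>
    intro i hi
    rw [List.foldl_cons]
    rcases eq_or_lt_of_le hi with h | h
    · subst h
      have : ¬ (s.length < s.length && s.getD s.length ' ' == d) = true := by simp
      rw [if_neg this, List.drop_length, ih _ le_rfl, List.drop_length]
      cases t' <;> simp [List.isSublist]
    · have hd := List.drop_eq_getElem_cons h
      by_cases hc : s[i] = d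
      · have : (i < s.length && s.getD i ' ' == d) = true := by
          simp [h, hc]
        rw [if_pos this, ih _ h, hd]
        simp [List.isSublist, hc]
      · have : ¬ (i < s.length && s.getD i ' ' == d) = true := by
          simp [h, hc]
        rw [if_neg this, ih _ (le_of_lt h), hd]
        simp [List.isSublist, hc]

theorem isSubseq_iff (s t : List Char) : IsSubseq s t = true ↔ s.Sublist t := by
  rw [IsSubseq, foldTP s t 0 (Nat.zero_le _), List.drop_zero, List.isSublist_iff_sublist]

theorem helpers_agree (s t : List Char) :
    IsSubsequence s t s.length t.length = IsSubseq s t := by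
  apply Bool.coe_iff_coe.mp
  rw [isSubsequence_iff s t t.length s.length le_rfl le_rfl, isSubseq_iff,
    List.take_length, List.take_length]

theorem foldA_eq (s1 : String) (l : List String) : ∀ (b : Bool) (k : Int),
    l.foldl (fun (p : Bool × Int) s2 =>
      if s1 = s2 then (p.1, p.2 + 1)
      else if IsSubsequence s1.toList s2.toList s1.toList.length s2.toList.length then
        (true, p.2)
      else p) (b, k)
    = (b || l.any (fun s2 => s2 != s1 && IsSubseq s1.toList s2.toList),
       k + (PySem.List.count l s1 : Int)) := by
  induction l with
  | nil => simp [PySem.List.count]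
  | cons s2 rest ih =>
    intro b k
    rw [List.foldl_cons]
    by_cases he : s1 = s2
    · subst he
      rw [if_pos rfl, ih]
      simp [PySem.List.count]
      omega
    · rw [if_neg he, helpers_agree]
      by_cases hs : IsSubseq s1.toList s2.toList
      · rw [if_pos hs, ih]
        simp [hs, Ne.symm he]
      · rw [if_neg (by simp [hs]), ih]
        simp [hs]
        simp [Ne.symm he]

theorem loops_agree (all : List String) : ∀ l, lusLoopA all l = lusLoopB all l := by
  intro l
  induction l with
  | nil => rfl
  | cons s1 rest ih =>
    rw [lusLoopA, lusLoopB, foldA_eq, ih]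
    have hbe : ((0 : Int) + (PySem.List.count all s1 : Int) == 2)
        = (PySem.List.count all s1 == 2) := by
      apply Bool.coe_iff_coe.mp
      simp only [beq_iff_eq]
      omega
    cases ha : all.any (fun s2 => s2 != s1 && IsSubseq s1.toList s2.toList) <;>
      cases hc2 : (PySem.List.count all s1 == 2) <;>
        simp [bne] <;>
          by_cases h2 : List.count s1 all = 2 <;>
            simp [h2] <;> omega

-- ===== VERDICT (by name: the statement is the Claim_ definition above) =====
theorem LUS_spec : Claim_equal_LUS := by
  intro arr _
  unfold Spec_LUS LUS LUS_alt
  split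
  · rfl
  · exact loops_agree _ _
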